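-- pv_equiv track=rewrite | github.com/pypi-data/pypi-mirror-97 | packages/pax2graphml/pax2graphml-1.0.2.tar.gz/pax2graphml-1.0.2/pax2graphml/utils.py | __formatRes
-- ===== SOURCE A (Python) =====
-- def __formatRes(st):
--   """utility to find json data in a stdout  string"""
--   ct=""
--   fd=0
--   ln=st.split("\n")
--   for l in ln:
--     if l.startswith("{"):
--       fd=1
--     if fd==1:
--       ct+=l
--
--   return ct
-- ===== SOURCE B (Python) =====
-- def __formatRes(st):
--   """utility to find json data in a stdout  string"""
--   if st.startswith("{"):
--     return st.replace("\n", "")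
--   k = st.find("\n{")
--   if k == -1:
--     return ""
--   return st[k + 1:].replace("\n", "")
-- ===== Notes on version B (the rewrite author's own statement) =====
-- stated objective: alternative
-- what changed: Replaces A's split-into-lines flag-accumulator loop with a raw-string computation: a substring search for the first line start '{' (startswith / find of "\n{"), then one slice and one replace('\n','') on the remainder; no line list is ever built.
import Mathlib
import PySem

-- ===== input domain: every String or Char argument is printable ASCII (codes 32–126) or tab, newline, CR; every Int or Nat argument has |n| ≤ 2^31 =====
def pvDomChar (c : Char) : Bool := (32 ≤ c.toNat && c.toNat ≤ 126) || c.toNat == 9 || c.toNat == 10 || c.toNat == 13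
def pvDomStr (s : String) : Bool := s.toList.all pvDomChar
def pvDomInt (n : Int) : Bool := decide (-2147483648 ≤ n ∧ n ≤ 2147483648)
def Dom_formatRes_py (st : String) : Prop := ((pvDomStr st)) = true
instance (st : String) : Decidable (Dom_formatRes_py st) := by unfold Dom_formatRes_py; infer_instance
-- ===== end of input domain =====

-- B replaces A's line loop with a raw-string substring search (str.find of "\n{") plus slice-and-strip; same cost, no line splitting.
-- ===== PORT A =====
-- A-side helper: the loop body of A (flag update, then conditional append)
def pvStepA (acc : String × Int) (l : String) : String × Int :=
  let fd := if PySem.Str.startswith l "{" then (1 : Int) else acc.2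
  if fd == 1 then (acc.1 ++ l, fd) else (acc.1, fd)

def formatRes_py (st : String) : String :=
  let ln := (PySem.Str.split? st "\n").getD []
  (ln.foldl pvStepA ("", 0)).1

-- ===== PORT B =====
def formatRes_py_alt (st : String) : String :=
  if PySem.Str.startswith st "{" then PySem.Str.replace st "\n" ""
  else if PySem.Str.find st "\n{" == -1 then ""
  else PySem.Str.replace (PySem.Str.slice st (some (PySem.Str.find st "\n{" + 1)) none) "\n" ""

-- ===== PRECONDITION & SPEC =====
def Spec_formatRes_py (st : String) (out : String) : Prop := out = formatRes_py_alt st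
instance (st : String) (out : String) : Decidable (Spec_formatRes_py st out) := by unfold Spec_formatRes_py; infer_instance

-- ===== CLAIM (what is proved, stated in full; the proofs are below) =====
def Claim_equal_formatRes_py : Prop := ∀ (st : String), Dom_formatRes_py st → Spec_formatRes_py st (formatRes_py st)

-- ===== LEMMAS AND PROOFS =====

-- ---- A-side: the flag-accumulator loop is join-of-dropWhile ----
theorem pvJoinCons (a : String) (ls : List String) :
    PySem.Str.join "" (a :: ls) = a ++ PySem.Str.join "" ls := by
  have h : PySem.Chars.join [] (a.toList :: ls.map String.toList)
      = a.toList ++ PySem.Chars.join [] (ls.map String.toList) := by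
    cases ls <;> simp [PySem.Chars.join, List.intercalate]
  simp [PySem.Str.join, h]

theorem pvJoinNil : PySem.Str.join "" [] = "" := by
  simp [PySem.Str.join, PySem.Chars.join, List.intercalate]

-- once the flag is 1 the loop appends every remaining line
theorem pvFold1 (ls : List String) (ct : String) :
    (ls.foldl pvStepA (ct, 1)).1 = ct ++ PySem.Str.join "" ls := by
  induction ls generalizing ct with
  | nil => simp [pvJoinNil]
  | cons a t ih =>
    have hstep : pvStepA (ct, 1) a = (ct ++ a, 1) := by
      by_cases h : PySem.Chars.startswith a.toList ['{'] <;> simp [pvStepA, h]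
    rw [List.foldl_cons, hstep, ih, pvJoinCons, String.append_assoc]

-- while the flag is 0 the loop drops lines until one starts with '{'
theorem pvFold0 (ls : List String) (ct : String) :
    (ls.foldl pvStepA (ct, 0)).1
    = ct ++ PySem.Str.join "" (ls.dropWhile (fun l => !PySem.Str.startswith l "{")) := by
  induction ls generalizing ct with
  | nil => simp [pvJoinNil]
  | cons a t ih =>
    by_cases h : PySem.Chars.startswith a.toList ['{']
    · have hstep : pvStepA (ct, 0) a = (ct ++ a, 1) := by simp [pvStepA, h]
      rw [List.foldl_cons, hstep, pvFold1]
      simp only [List.dropWhile_cons, PySem.Str.startswith_eq]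
      rw [if_neg (by simp [h]), pvJoinCons, String.append_assoc]
    · have hstep : pvStepA (ct, 0) a = (ct, 0) := by simp [pvStepA, h]
      rw [List.foldl_cons, hstep, ih]
      simp [h]

-- ---- split/replace/join at the char-list level ----

-- structural companion of PySem.Chars.splitOn for a one-char separator
def pvSplit : List Char → List Char → List (List Char)
  | pre, [] => [pre]
  | pre, c :: t => if c = '\n' then pre :: pvSplit [] t else pvSplit (pre ++ [c]) t

theorem pv_go_zero (l cur : List Char) (acc : List (List Char)) :
    PySem.Chars.splitOn.go ['\n'] 0 l cur acc = ((cur.reverse ++ l) :: acc).reverse := rfl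

theorem pv_go_nil (f : Nat) (cur : List Char) (acc : List (List Char)) :
    PySem.Chars.splitOn.go ['\n'] (f + 1) [] cur acc = (cur.reverse :: acc).reverse := rfl

theorem pv_go_cons (f : Nat) (c : Char) (t cur : List Char) (acc : List (List Char)) :
    PySem.Chars.splitOn.go ['\n'] (f + 1) (c :: t) cur acc
    = if ['\n'].isPrefixOf (c :: t)
      then PySem.Chars.splitOn.go ['\n'] f t [] (cur.reverse :: acc)
      else PySem.Chars.splitOn.go ['\n'] f t (c :: cur) acc := rfl

theorem pv_go_eq (l : List Char) (fuel : Nat) (cur : List Char) (acc : List (List Char))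
    (h : l.length ≤ fuel) :
    PySem.Chars.splitOn.go ['\n'] fuel l cur acc = acc.reverse ++ pvSplit cur.reverse l := by
  induction l generalizing fuel cur acc with
  | nil =>
    cases fuel with
    | zero => simp [pv_go_zero, pvSplit]
    | succ f => simp [pv_go_nil, pvSplit]
  | cons c t ih =>
    cases fuel with
    | zero => simp at h
    | succ f =>
      rw [pv_go_cons]
      by_cases hc : c = '\n'
      · subst hc
        rw [if_pos (by simp [List.isPrefixOf])]
        rw [ih f [] (cur.reverse :: acc) (by simpa using h)]
        simp [pvSplit]
      · rw [if_neg (by simp [List.isPrefixOf]; exact fun h' => hc h'.symm)]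
        rw [ih f (c :: cur) acc (by simpa using Nat.le_of_succ_le_succ h)]
        simp [pvSplit, hc]

theorem pv_splitOn_eq (cs : List Char) : PySem.Chars.splitOn cs ['\n'] = pvSplit [] cs := by
  have h : PySem.Chars.splitOn cs ['\n']
      = PySem.Chars.splitOn.go ['\n'] (cs.length + 1) cs [] [] := rfl
  rw [h, pv_go_eq cs (cs.length + 1) [] [] (by omega)]
  simp

theorem pv_rgo_zero (l acc : List Char) :
    PySem.Chars.replace.go ['\n'] [] 0 l acc = acc.reverse ++ l := rfl

theorem pv_rgo_nil (f : Nat) (acc : List Char) :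
    PySem.Chars.replace.go ['\n'] [] (f + 1) [] acc = acc.reverse := rfl

theorem pv_rgo_cons (f : Nat) (c : Char) (t acc : List Char) :
    PySem.Chars.replace.go ['\n'] [] (f + 1) (c :: t) acc
    = if ['\n'].isPrefixOf (c :: t)
      then PySem.Chars.replace.go ['\n'] [] f t acc
      else PySem.Chars.replace.go ['\n'] [] f t (c :: acc) := rfl

theorem pv_rgo_eq (l : List Char) (fuel : Nat) (acc : List Char) (h : l.length ≤ fuel) :
    PySem.Chars.replace.go ['\n'] [] fuel l acc
    = acc.reverse ++ l.filter (fun c => !(c == '\n')) := by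
  induction l generalizing fuel acc with
  | nil =>
    cases fuel with
    | zero => simp [pv_rgo_zero]
    | succ f => simp [pv_rgo_nil]
  | cons c t ih =>
    cases fuel with
    | zero => simp at h
    | succ f =>
      rw [pv_rgo_cons]
      by_cases hc : c = '\n'
      · subst hc
        rw [if_pos (by simp [List.isPrefixOf])]
        rw [ih f acc (by simpa using Nat.le_of_succ_le_succ h)]
        simp
      · rw [if_neg (by simp [List.isPrefixOf]; exact fun h' => hc h'.symm)]
        rw [ih f (c :: acc) (by simpa using Nat.le_of_succ_le_succ h)]
        simp [hc]

theorem pv_replace_eq (cs : List Char) :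
    PySem.Chars.replace cs ['\n'] [] = cs.filter (fun c => !(c == '\n')) := by
  have h : PySem.Chars.replace cs ['\n'] []
      = PySem.Chars.replace.go ['\n'] [] cs.length cs [] := rfl
  rw [h, pv_rgo_eq cs cs.length [] (by omega)]
  simp

theorem pv_join_flatten (parts : List (List Char)) :
    PySem.Chars.join [] parts = parts.flatten := by
  induction parts with
  | nil => simp [PySem.Chars.join, List.intercalate]
  | cons a ls ih =>
    have h : PySem.Chars.join [] (a :: ls) = a ++ PySem.Chars.join [] ls := by
      cases ls <;> simp [PySem.Chars.join, List.intercalate]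
    rw [h, ih]
    simp

theorem pv_flatten_split (l : List Char) :
    ∀ pre : List Char, (pvSplit pre l).flatten = pre ++ l.filter (fun c => !(c == '\n')) := by
  induction l with
  | nil => intro pre; simp [pvSplit]
  | cons c t ih =>
    intro pre
    by_cases hc : c = '\n'
    · subst hc; simp [pvSplit, ih]
    · simp [pvSplit, hc, ih]

theorem pv_split_no_nl (l : List Char) :
    ∀ pre : List Char, '\n' ∉ l → pvSplit pre l = [pre ++ l] := by
  induction l with
  | nil => intro pre _; simp [pvSplit]
  | cons c t ih =>
    intro pre h
    have hc : c ≠ '\n' := fun hcc => h (by simp [hcc])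
    have ht : '\n' ∉ t := fun htt => h (by simp [htt])
    simp [pvSplit, hc, ih _ ht]

theorem pv_split_break (l0 : List Char) (rest : List Char) (h : '\n' ∉ l0) :
    ∀ pre : List Char, pvSplit pre (l0 ++ '\n' :: rest) = (pre ++ l0) :: pvSplit [] rest := by
  induction l0 with
  | nil => intro pre; simp [pvSplit]
  | cons c t ih =>
    intro pre
    have hc : c ≠ '\n' := fun hcc => h (by simp [hcc])
    have ht : '\n' ∉ t := fun htt => h (by simp [htt])
    simp only [List.cons_append, pvSplit, if_neg hc]
    rw [ih ht (pre ++ [c])]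
    simp

theorem pv_split_head (l : List Char) :
    ∀ pre : List Char, ∃ fl tl, pvSplit pre l = fl :: tl ∧ pre <+: fl := by
  induction l with
  | nil => intro pre; exact ⟨pre, [], rfl, List.prefix_refl pre⟩
  | cons c t ih =>
    intro pre
    by_cases hc : c = '\n'
    · subst hc; exact ⟨pre, pvSplit [] t, by simp [pvSplit], List.prefix_refl pre⟩
    · obtain ⟨fl, tl, h1, h2⟩ := ih (pre ++ [c])
      exact ⟨fl, tl, by simp [pvSplit, hc, h1], (List.prefix_append pre [c]).trans h2⟩

-- a startswith '{' string is literally '{' followed by a tail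
theorem pv_startswith_brace (cs : List Char) (h : PySem.Chars.startswith cs ['{'] = true) :
    ∃ t, cs = '{' :: t := by
  rcases (PySem.Chars.startswith_iff cs ['{']).1 h with ⟨t, ht⟩
  exact ⟨t, ht.symm⟩

-- if a dropWhile result starts with d then p d is false
theorem pv_dropWhile_head (p : Char → Bool) (l : List Char) (d : Char) (r : List Char)
    (h : l.dropWhile p = d :: r) : p d = false := by
  induction l with
  | nil => simp at h
  | cons c t ih =>
    rw [List.dropWhile_cons] at h
    by_cases hc : p c
    · rw [if_pos hc] at h; exact ih h
    · rw [if_neg hc] at h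
      injection h with h1 _
      rw [← h1]
      simpa using hc

-- find points at the FIRST occurrence; conversely, a first occurrence determines find
theorem pv_find_eq_of (cs sub : List Char) (n : Nat)
    (h1 : sub <+: cs.drop n) (h2 : ∀ i, i < n → ¬ sub <+: cs.drop i) :
    PySem.Chars.find cs sub = n := by
  have hinf : sub <:+: cs := by
    rcases h1 with ⟨t, ht⟩
    exact ⟨cs.take n, t, by rw [List.append_assoc, ht]; exact List.take_append_drop n cs⟩
  have hf : 0 ≤ PySem.Chars.find cs sub := (PySem.Chars.find_nonneg_iff cs sub).2 hinf
  obtain ⟨hp, hmin⟩ := PySem.Chars.find_spec hf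
  have hne1 : ¬ (PySem.Chars.find cs sub).toNat < n := fun hlt => h2 _ hlt hp
  have hne2 : ¬ n < (PySem.Chars.find cs sub).toNat := fun hlt => hmin n hlt h1
  omega

-- a "\n{" occurrence cannot start inside the newline-free first line
theorem pv_no_match_early (l0 rest : List Char) (h0 : '\n' ∉ l0) (i : Nat) (hi : i < l0.length) :
    ¬ (['\n', '{'] <+: (l0 ++ '\n' :: rest).drop i) := by
  intro h
  rcases h with ⟨t, ht⟩
  have h1 : (l0 ++ '\n' :: rest)[i]? = some '\n' := by
    have hd : (List.drop i (l0 ++ '\n' :: rest))[0]? = some '\n' := by rw [← ht]; rfl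
    rwa [List.getElem?_drop, Nat.add_zero] at hd
  have h2 : (l0 ++ '\n' :: rest)[i]? = l0[i]? := List.getElem?_append_left hi
  rw [h2] at h1
  have h3 : l0[i]? = some l0[i] := List.getElem?_eq_getElem hi
  rw [h3] at h1
  have h4 : l0[i] = '\n' := by simpa using h1
  exact h0 (h4 ▸ List.getElem_mem hi)

-- the tail of the string after the first line
theorem pv_drop_first (l0 rest : List Char) (k : Nat) :
    (l0 ++ '\n' :: rest).drop (l0.length + 1 + k) = rest.drop k := by
  have h : l0 ++ '\n' :: rest = (l0 ++ ['\n']) ++ rest := by simp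
  rw [h, List.drop_append, List.drop_eq_nil_of_le (by simp)]
  have h2 : l0.length + 1 + k - (l0 ++ ['\n']).length = k := by simp
  rw [h2]
  simp

-- a match at the end of the first line forces the rest to start with '{'
theorem pv_match_boundary (l0 rest : List Char)
    (h : ['\n', '{'] <+: (l0 ++ '\n' :: rest).drop l0.length) :
    PySem.Chars.startswith rest ['{'] = true := by
  rw [List.drop_left] at h
  rcases h with ⟨t, ht⟩
  injection ht with _ h2
  exact (PySem.Chars.startswith_iff rest ['{']).2 ⟨t, h2⟩

-- ---- B as a char-list function, and the main equivalence ----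
def pvRHS (cs : List Char) : List Char :=
  if PySem.Chars.startswith cs ['{'] then cs.filter (fun c => !(c == '\n'))
  else if PySem.Chars.find cs ['\n', '{'] = -1 then []
  else ((cs.drop ((PySem.Chars.find cs ['\n', '{']).toNat + 1)).filter (fun c => !(c == '\n')))

theorem pv_main (n : Nat) : ∀ cs : List Char, cs.length ≤ n →
    ((pvSplit [] cs).dropWhile (fun l => !PySem.Chars.startswith l ['{'])).flatten = pvRHS cs := by
  induction n with
  | zero =>
    intro cs hcs
    have hnil : cs = [] := by
      cases cs with
      | nil => rfl
      | cons a t => simp at hcs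
    subst hnil
    have hf : PySem.Chars.find [] ['\n', '{'] = -1 := by
      rw [PySem.Chars.find_eq_neg_one_iff]
      intro h
      have := h.sublist.length_le
      simp at this
    simp [pvSplit, pvRHS, PySem.Chars.startswith, List.isPrefixOf, hf]
  | succ n ih =>
    intro cs hcs
    by_cases hsw : PySem.Chars.startswith cs ['{']
    · -- first line starts with '{': everything is kept
      obtain ⟨t, rfl⟩ := pv_startswith_brace cs hsw
      obtain ⟨fl, tl, hsplit, hpre⟩ := pv_split_head t ['{']
      have hsplit' : pvSplit [] ('{' :: t) = fl :: tl := by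
        rw [show pvSplit [] ('{' :: t) = pvSplit ['{'] t from rfl]
        exact hsplit
      have hflsw : PySem.Chars.startswith fl ['{'] = true :=
        (PySem.Chars.startswith_iff fl ['{']).2 hpre
      rw [hsplit', List.dropWhile_cons, if_neg (by simp [hflsw]), ← hsplit']
      rw [pv_flatten_split, pvRHS, if_pos hsw]
      simp
    · -- first line does not start with '{'
      by_cases hnl : '\n' ∈ cs
      · -- split off the first line
        obtain ⟨l0, rest, hdec, h0⟩ :
            ∃ l0 rest, cs = l0 ++ '\n' :: rest ∧ '\n' ∉ l0 := by
          have hne : cs.dropWhile (fun c => !(c == '\n')) ≠ [] := by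
            intro hemp
            have hall : cs = cs.takeWhile (fun c => !(c == '\n')) := by
              conv_lhs => rw [← List.takeWhile_append_dropWhile
                (p := fun c => !(c == '\n')) (l := cs)]
              rw [hemp]
              simp
            rw [hall] at hnl
            have := List.mem_takeWhile_imp (p := fun c => !(c == '\n')) hnl
            simp at this
          obtain ⟨d, r, hdr⟩ := List.exists_cons_of_ne_nil hne
          have hd : (fun c => !(c == '\n')) d = false :=
            pv_dropWhile_head (fun c => !(c == '\n')) cs d r hdr
          have hd' : d = '\n' := by simpa using hd
          refine ⟨cs.takeWhile (fun c => !(c == '\n')), r, ?_, ?_⟩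
          · conv_lhs => rw [← List.takeWhile_append_dropWhile
              (p := fun c => !(c == '\n')) (l := cs)]
            rw [hdr, hd']
          · intro hmem
            have := List.mem_takeWhile_imp (p := fun c => !(c == '\n')) hmem
            simp at this
        subst hdec
        -- the first line does not start with '{'
        have hl0 : ¬ PySem.Chars.startswith l0 ['{'] = true := by
          intro h
          rcases (PySem.Chars.startswith_iff l0 ['{']).1 h with ⟨t, ht⟩
          apply hsw
          refine (PySem.Chars.startswith_iff _ _).2 ⟨t ++ '\n' :: rest, ?_⟩
          rw [← ht]
          simp
        have hlhs : ((pvSplit [] (l0 ++ '\n' :: rest)).dropWhile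
              (fun l => !PySem.Chars.startswith l ['{'])).flatten
            = ((pvSplit [] rest).dropWhile (fun l => !PySem.Chars.startswith l ['{'])).flatten := by
          rw [pv_split_break l0 rest h0 [], List.dropWhile_cons, if_pos (by simp [hl0])]
        have hrec : ((pvSplit [] rest).dropWhile (fun l => !PySem.Chars.startswith l ['{'])).flatten
            = pvRHS rest := by
          apply ih
          simp [List.length_append] at hcs
          omega
        rw [hlhs, hrec]
        -- now compare pvRHS rest with pvRHS (l0 ++ '\n' :: rest)
        by_cases hr : PySem.Chars.startswith rest ['{']
        · -- the match is right at the end of the first line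
          obtain ⟨r2, hrr⟩ := pv_startswith_brace rest hr
          have hfind : PySem.Chars.find (l0 ++ '\n' :: rest) ['\n', '{'] = (l0.length : Int) := by
            apply pv_find_eq_of
            · rw [List.drop_left, hrr]
              exact ⟨r2, rfl⟩
            · intro i hi
              exact pv_no_match_early l0 rest h0 i hi
          simp only [pvRHS]
          rw [if_pos hr, if_neg hsw, hfind, if_neg (by omega)]
          have hdrop : (l0 ++ '\n' :: rest).drop (((l0.length : Int)).toNat + 1) = rest := by
            rw [Int.toNat_natCast]
            simpa using pv_drop_first l0 rest 0
          rw [hdrop]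
        · -- no match at the boundary: recurse into rest
          by_cases hin : ['\n', '{'] <:+: rest
          · -- rest contains "\n{"
            have hfr : 0 ≤ PySem.Chars.find rest ['\n', '{'] :=
              (PySem.Chars.find_nonneg_iff rest ['\n', '{']).2 hin
            obtain ⟨hp, hmin⟩ := PySem.Chars.find_spec hfr
            have hfind : PySem.Chars.find (l0 ++ '\n' :: rest) ['\n', '{']
                = ((l0.length + 1 + (PySem.Chars.find rest ['\n', '{']).toNat : Nat) : Int) := by
              apply pv_find_eq_of
              · rw [pv_drop_first l0 rest _]
                exact hp
              · intro i hi
                rcases Nat.lt_trichotomy i l0.length with hlt | heq | hgt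
                · exact pv_no_match_early l0 rest h0 i hlt
                · subst heq
                  intro hpre
                  exact absurd (pv_match_boundary l0 rest hpre) hr
                · intro hpre
                  have hj : i - l0.length - 1 < (PySem.Chars.find rest ['\n', '{']).toNat := by
                    omega
                  apply hmin _ hj
                  have hdd : (l0 ++ '\n' :: rest).drop i = rest.drop (i - l0.length - 1) := by
                    have := pv_drop_first l0 rest (i - l0.length - 1)
                    rwa [show l0.length + 1 + (i - l0.length - 1) = i by omega] at this
                  rwa [hdd] at hpre
            have hfrne : ¬ PySem.Chars.find rest ['\n', '{'] = -1 := by omega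
            simp only [pvRHS]
            rw [if_neg hr, if_neg hsw, if_neg hfrne, hfind, if_neg (by omega)]
            have h1 : (((l0.length + 1 + (PySem.Chars.find rest ['\n', '{']).toNat : Nat) : Int)).toNat + 1
                = l0.length + 1 + ((PySem.Chars.find rest ['\n', '{']).toNat + 1) := by
              omega
            rw [h1, pv_drop_first l0 rest _]
          · -- no "\n{" anywhere
            have hfr : PySem.Chars.find rest ['\n', '{'] = -1 :=
              (PySem.Chars.find_eq_neg_one_iff rest ['\n', '{']).2 hin
            have hfc : PySem.Chars.find (l0 ++ '\n' :: rest) ['\n', '{'] = -1 := by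
              rw [PySem.Chars.find_eq_neg_one_iff]
              intro hinf
              have hex : ∃ j, ['\n', '{'] <+: (l0 ++ '\n' :: rest).drop j :=
                (PySem.Chars.exists_prefix_drop_iff_isIn ['\n', '{'] (l0 ++ '\n' :: rest)).2
                  ((PySem.Chars.isIn_iff_infix ['\n', '{'] (l0 ++ '\n' :: rest)).2 hinf)
              obtain ⟨j, hj⟩ := hex
              rcases Nat.lt_trichotomy j l0.length with hlt | heq | hgt
              · exact pv_no_match_early l0 rest h0 j hlt hj
              · subst heq
                exact absurd (pv_match_boundary l0 rest hj) hr
              · apply hin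
                have hdd : (l0 ++ '\n' :: rest).drop j = rest.drop (j - l0.length - 1) := by
                  have := pv_drop_first l0 rest (j - l0.length - 1)
                  rwa [show l0.length + 1 + (j - l0.length - 1) = j by omega] at this
                rw [hdd] at hj
                rcases hj with ⟨t, ht⟩
                exact ⟨rest.take (j - l0.length - 1), t,
                  by rw [List.append_assoc, ht]; exact List.take_append_drop _ rest⟩
            simp only [pvRHS]
            rw [if_neg hr, if_neg hsw, if_pos hfc, if_pos hfr]
      · -- a single line, not starting with '{': everything is dropped, and there is no "\n{"
        rw [pv_split_no_nl cs [] hnl, List.dropWhile_cons, if_pos (by simpa using hsw)]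
        have hfc : PySem.Chars.find cs ['\n', '{'] = -1 := by
          rw [PySem.Chars.find_eq_neg_one_iff]
          intro hinf
          exact hnl (hinf.sublist.subset (by simp))
        rw [pvRHS, if_neg hsw, if_pos hfc]
        simp

-- B, expressed through pvRHS on the character list
theorem pv_alt_eq (st : String) : formatRes_py_alt st = String.ofList (pvRHS st.toList) := by
  unfold formatRes_py_alt pvRHS
  have h1 : PySem.Str.startswith st "{" = PySem.Chars.startswith st.toList ['{'] := by
    simp [PySem.Str.startswith]
  have h2 : PySem.Str.find st "\n{" = PySem.Chars.find st.toList ['\n', '{'] := by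
    simp [PySem.Str.find_eq]
  by_cases hsw : PySem.Chars.startswith st.toList ['{'] = true
  · rw [if_pos (h1.trans hsw), if_pos hsw, PySem.Str.replace]
    congr 1
    rw [show ("\n" : String).toList = ['\n'] by simp, show ("" : String).toList = [] by simp]
    exact pv_replace_eq _
  · rw [if_neg (by rw [h1]; exact hsw), if_neg hsw]
    by_cases hm1 : PySem.Chars.find st.toList ['\n', '{'] = -1
    · simp only [h2, beq_iff_eq]
      rw [if_pos hm1, if_pos hm1]
    · simp only [h2, beq_iff_eq]
      rw [if_neg hm1, if_neg hm1]
      have hge : 0 ≤ PySem.Chars.find st.toList ['\n', '{'] := by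
        have := PySem.Chars.neg_one_le_find st.toList ['\n', '{']
        omega
      rw [PySem.Str.replace]
      refine congrArg String.ofList ?_
      rw [show ("\n" : String).toList = ['\n'] by simp, show ("" : String).toList = [] by simp]
      have hsl : (PySem.Str.slice st (some (PySem.Chars.find st.toList ['\n', '{'] + 1)) none).toList
          = st.toList.drop ((PySem.Chars.find st.toList ['\n', '{']).toNat + 1) := by
        rw [PySem.Str.toList_slice, PySem.Chars.slice_eq_listSlice,
          PySem.List.slice_from _ (by omega : (0 : Int) ≤ PySem.Chars.find st.toList ['\n', '{'] + 1)]
        congr 1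
        omega
      rw [hsl, pv_replace_eq]

-- ===== VERDICT (by name: the statement is the Claim_ definition above) =====
theorem formatRes_py_spec : Claim_equal_formatRes_py := by
  intro st _
  unfold Spec_formatRes_py
  have hA : formatRes_py st
      = PySem.Str.join ""
          (((PySem.Str.split? st "\n").getD []).dropWhile (fun l => !PySem.Str.startswith l "{")) := by
    unfold formatRes_py
    rw [pvFold0]
    simp
  rw [hA]
  have hsplit : (PySem.Str.split? st "\n").getD []
      = (pvSplit [] st.toList).map String.ofList := by
    simp [PySem.Str.split?, PySem.Chars.split?, pv_splitOn_eq]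
  rw [hsplit]
  rw [List.dropWhile_map]
  have hpred : ((fun l => !PySem.Str.startswith l "{") ∘ String.ofList)
      = fun l => !PySem.Chars.startswith l ['{'] := by
    funext l
    simp [PySem.Str.startswith]
  rw [hpred]
  have hjoin : PySem.Str.join ""
        (((pvSplit [] st.toList).dropWhile (fun l => !PySem.Chars.startswith l ['{'])).map String.ofList)
      = String.ofList
          (((pvSplit [] st.toList).dropWhile (fun l => !PySem.Chars.startswith l ['{'])).flatten) := by
    rw [PySem.Str.join]
    congr 1
    rw [List.map_map]
    have hid : (String.toList ∘ String.ofList) = (id : List Char → List Char) := by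
      funext l
      simp
    rw [hid, List.map_id]
    simpa using pv_join_flatten _
  rw [hjoin, pv_main (st.toList.length) st.toList (le_refl _), pv_alt_eq]
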